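-- pv_equiv track=rewrite | github.com/tankyx/LeekWars-AI | tools/generate_item_database.py | generate_effect_map
-- ===== SOURCE A (Python) =====
-- def generate_effect_map(effects):
--     """Generate LeekScript map representation of effects array"""
--     if not effects:
--         return '[:]'
--
--     # Group effects by effect ID, summing values
--     effect_groups = {}
--     for effect in effects:
--         effect_id = effect['type']  # The 'type' field is the effect constant (EFFECT_DAMAGE, EFFECT_POISON, etc.)
--
--         if effect_id not in effect_groups:
--             effect_groups[effect_id] = {
--                 'min': 0,
--                 'max': 0,
--                 'turns': effect.get('turns', 0)
--             }
--
--         effect_groups[effect_id]['min'] += effect.get('value1', 0)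
--         effect_groups[effect_id]['max'] += effect.get('value2', 0)
--         # Use max turns if multiple effects of same type
--         effect_groups[effect_id]['turns'] = max(effect_groups[effect_id]['turns'], effect.get('turns', 0))
--
--     # Build LeekScript map
--     entries = []
--     for effect_id, values in effect_groups.items():
--         # Format: effect_id: [min, max, turns]
--         entries.append(f"{effect_id}: [{values['min']}, {values['max']}, {values['turns']}]")
--
--     return '[' + ', '.join(entries) + ']'
-- ===== SOURCE B (Python) =====
-- def generate_effect_map(effects):
--     """Generate LeekScript map representation of effects array"""
--     if not effects:
--         return '[:]'
--
--     # First pass: group the effect dicts by their 'type' id (first-occurrence order)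
--     groups = {}
--     for effect in effects:
--         groups.setdefault(effect['type'], []).append(effect)
--
--     # Second pass: aggregate each group and format
--     entries = []
--     for effect_id, group in groups.items():
--         mn = sum(e.get('value1', 0) for e in group)
--         mx = sum(e.get('value2', 0) for e in group)
--         turns = max(e.get('turns', 0) for e in group)
--         entries.append(f"{effect_id}: [{mn}, {mx}, {turns}]")
--
--     return '[' + ', '.join(entries) + ']'
-- ===== Notes on version B (the rewrite author's own statement) =====
-- stated objective: alternative
-- what changed: B materializes groups (dict of lists built in one pass) and aggregates each group in a second pass with sum/max, instead of A's running min/max/turns accumulators updated per element.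
import Mathlib
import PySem

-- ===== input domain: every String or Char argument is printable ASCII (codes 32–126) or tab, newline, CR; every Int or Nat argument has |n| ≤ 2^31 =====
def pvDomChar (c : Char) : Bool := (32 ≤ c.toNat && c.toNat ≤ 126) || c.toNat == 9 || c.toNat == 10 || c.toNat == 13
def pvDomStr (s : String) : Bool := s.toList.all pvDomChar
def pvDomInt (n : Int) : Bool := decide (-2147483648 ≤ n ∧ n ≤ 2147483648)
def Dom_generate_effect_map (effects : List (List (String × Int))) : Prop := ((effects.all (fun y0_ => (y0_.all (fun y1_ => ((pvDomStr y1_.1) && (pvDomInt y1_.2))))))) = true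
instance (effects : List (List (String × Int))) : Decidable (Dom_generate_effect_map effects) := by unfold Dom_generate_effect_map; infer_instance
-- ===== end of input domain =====

-- B changes the decomposition only: one grouping pass, then a separate aggregation pass (same cost).
-- shared helpers: e.get('value1', 0), e.get('value2', 0), e.get('turns', 0) and the shared f-string
def pvVal1 (e : List (String × Int)) : Int := (List.lookup "value1" e).getD 0
def pvVal2 (e : List (String × Int)) : Int := (List.lookup "value2" e).getD 0
def pvTurns (e : List (String × Int)) : Int := (List.lookup "turns" e).getD 0
-- f"{effect_id}: [{a}, {b}, {c}]" (identical in A and B)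
def pvFmt (id a b c : Int) : List Char :=
  PySem.Int.toChars id ++ (": [".toList) ++ PySem.Int.toChars a ++ (", ".toList) ++
  PySem.Int.toChars b ++ (", ".toList) ++ PySem.Int.toChars c ++ ("]".toList)

-- ===== PORT A =====
-- the grouping loop; none = KeyError on effect['type'] (excluded by Pre_)
def pvLoopA : List (List (String × Int)) → PySem.Dict Int (Int × Int × Int) →
    Option (PySem.Dict Int (Int × Int × Int))
  | [], g => some g
  | e :: rest, g =>
    match List.lookup "type" e with
    | none => none
    | some eid =>
      let g1 := if g.contains eid then g else g.insert eid (0, 0, pvTurns e)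
      let v := g1.getD eid (0, 0, 0)
      pvLoopA rest (g1.insert eid (v.1 + pvVal1 e, v.2.1 + pvVal2 e, max v.2.2 (pvTurns e)))

def generate_effect_map (effects : List (List (String × Int))) : String :=
  if effects = [] then "[:]"
  else
    match pvLoopA effects PySem.Dict.empty with
    | none => ""   -- KeyError path, outside Pre_
    | some g =>
      String.ofList ('[' :: PySem.Chars.join (", ".toList)
        (g.items.map (fun p => pvFmt p.1 p.2.1 p.2.2.1 p.2.2.2)) ++ [']'])

-- ===== PORT B =====
-- first pass: groups.setdefault(effect['type'], []).append(effect); none = KeyError (excluded by Pre_)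
def pvLoopB : List (List (String × Int)) → PySem.Dict Int (List (List (String × Int))) →
    Option (PySem.Dict Int (List (List (String × Int))))
  | [], g => some g
  | e :: rest, g =>
    match List.lookup "type" e with
    | none => none
    | some eid => pvLoopB rest (g.insert eid (g.getD eid [] ++ [e]))

def generate_effect_map_alt (effects : List (List (String × Int))) : String :=
  if effects = [] then "[:]"
  else
    match pvLoopB effects PySem.Dict.empty with
    | none => ""   -- KeyError path, outside Pre_
    | some g =>
      String.ofList ('[' :: PySem.Chars.join (", ".toList)
        (g.items.map (fun p =>
          pvFmt p.1 ((p.2.map pvVal1).sum) ((p.2.map pvVal2).sum)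
            -- max(e.get('turns',0) for e in group): groups are never empty, so the .getD 0 branch is unreachable
            ((PySem.List.max? (p.2.map pvTurns) (fun y => y)).getD 0))) ++ [']'])

-- ===== PRECONDITION & SPEC =====
-- Pre_ excludes exactly the inputs where effect['type'] raises KeyError (both A and B raise there).
def Pre_generate_effect_map (effects : List (List (String × Int))) : Prop :=
  ∀ e ∈ effects, (List.lookup "type" e).isSome = true
instance (effects : List (List (String × Int))) : Decidable (Pre_generate_effect_map effects) := by
  unfold Pre_generate_effect_map; infer_instance

def pvWitness_generate_effect_map : (List (List (String × Int))) :=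
  [[("type", 12), ("value1", 5), ("value2", 9)], [("type", 12), ("turns", 3)]]

def Spec_generate_effect_map (effects : List (List (String × Int))) (out : String) : Prop := out = generate_effect_map_alt effects
instance (effects : List (List (String × Int))) (out : String) : Decidable (Spec_generate_effect_map effects out) := by unfold Spec_generate_effect_map; infer_instance

-- ===== CLAIM (what is proved, stated in full; the proofs are below) =====
def Claim_equal_generate_effect_map : Prop := ∀ (effects : List (List (String × Int))), Dom_generate_effect_map effects → Pre_generate_effect_map effects → Spec_generate_effect_map effects (generate_effect_map effects)

-- ===== LEMMAS AND PROOFS =====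

-- effect['type'] as a total function (used only under Pre_)
def pvTid (e : List (String × Int)) : Int := (List.lookup "type" e).getD 0

def pvUpd (g : PySem.Dict Int (Int × Int × Int)) (e : List (String × Int)) : Int × Int × Int :=
  if g.contains (pvTid e) then
    let v := g.getD (pvTid e) (0, 0, 0)
    (v.1 + pvVal1 e, v.2.1 + pvVal2 e, max v.2.2 (pvTurns e))
  else (pvVal1 e, pvVal2 e, pvTurns e)

def pvStepA (g : PySem.Dict Int (Int × Int × Int)) (e : List (String × Int)) :
    PySem.Dict Int (Int × Int × Int) := g.insert (pvTid e) (pvUpd g e)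

def pvStepB (g : PySem.Dict Int (List (List (String × Int)))) (e : List (String × Int)) :
    PySem.Dict Int (List (List (String × Int))) := g.insert (pvTid e) (g.getD (pvTid e) [] ++ [e])

def pvAgg (h : List (String × Int)) (tl : List (List (String × Int))) : Int × Int × Int :=
  (pvVal1 h + (tl.map pvVal1).sum, pvVal2 h + (tl.map pvVal2).sum,
   (tl.map pvTurns).foldl max (pvTurns h))

def pvRel (dA : PySem.Dict Int (Int × Int × Int))
    (dB : PySem.Dict Int (List (List (String × Int)))) : Prop :=
  ∀ k : Int,
    (dA.contains k = dB.contains k) ∧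
    (∀ h tl, dB.getD k [] = h :: tl → dA.getD k (0, 0, 0) = pvAgg h tl) ∧
    (dB.contains k = true → dB.getD k [] ≠ [])

theorem pvLoopA_eq (l : List (List (String × Int))) (g : PySem.Dict Int (Int × Int × Int))
    (h : ∀ e ∈ l, (List.lookup "type" e).isSome = true) :
    pvLoopA l g = some (l.foldl pvStepA g) := by
  induction l generalizing g with
  | nil => rfl
  | cons e rest ih =>
    have he := h e (by simp)
    obtain ⟨eid, heid⟩ := Option.isSome_iff_exists.mp he
    have htid : pvTid e = eid := by simp [pvTid, heid]
    simp only [pvLoopA, heid, List.foldl_cons]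
    rw [ih _ (fun x hx => h x (by simp [hx]))]
    congr 1
    by_cases hc : g.contains eid
    · simp [pvStepA, pvUpd, htid, hc]
    · simp only [pvStepA, pvUpd, htid, hc, if_neg, Bool.not_eq_true]
      rw [PySem.Dict.insert_insert_self]
      simp [PySem.Dict.getD_insert_self]

theorem pvLoopB_eq (l : List (List (String × Int)))
    (g : PySem.Dict Int (List (List (String × Int))))
    (h : ∀ e ∈ l, (List.lookup "type" e).isSome = true) :
    pvLoopB l g = some (l.foldl pvStepB g) := by
  induction l generalizing g with
  | nil => rfl
  | cons e rest ih =>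
    have he := h e (by simp)
    obtain ⟨eid, heid⟩ := Option.isSome_iff_exists.mp he
    have htid : pvTid e = eid := by simp [pvTid, heid]
    simp only [pvLoopB, heid, List.foldl_cons]
    rw [ih _ (fun x hx => h x (by simp [hx]))]
    simp [pvStepB, htid]

theorem pvRel_step (dA : PySem.Dict Int (Int × Int × Int))
    (dB : PySem.Dict Int (List (List (String × Int)))) (e : List (String × Int))
    (hr : pvRel dA dB) : pvRel (pvStepA dA e) (pvStepB dB e) := by
  intro k
  obtain ⟨hc, hv, hne⟩ := hr k
  by_cases hk : k = pvTid e
  · subst hk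
    refine ⟨by simp [pvStepA, pvStepB, PySem.Dict.contains_insert_self], ?_, ?_⟩
    · intro h tl hget
      rw [pvStepB, PySem.Dict.getD_insert_self] at hget
      rw [pvStepA, PySem.Dict.getD_insert_self]
      rcases hB : dB.getD (pvTid e) [] with _ | ⟨h0, tl0⟩
      · -- group was empty: fresh key
        rw [hB] at hget
        simp only [List.nil_append, List.cons.injEq] at hget
        obtain ⟨rfl, rfl⟩ := hget
        have hBc : dB.contains (pvTid e) = false := by
          by_contra hx
          exact hne (by revert hx; cases dB.contains (pvTid e) <;> simp) hB
        have hAc : dA.contains (pvTid e) = false := hc.trans hBc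
        simp [pvUpd, hAc, pvAgg]
      · -- group nonempty: existing key
        rw [hB] at hget
        have hBc : dB.contains (pvTid e) = true := by
          by_contra hx
          have : dB.getD (pvTid e) [] = [] :=
            PySem.Dict.getD_of_not_contains dB [] (by revert hx; cases dB.contains (pvTid e) <;> simp)
          simp [this] at hB
        have hAc : dA.contains (pvTid e) = true := hc.trans hBc
        have hval := hv h0 tl0 hB
        have hct : h0 :: (tl0 ++ [e]) = h :: tl := by simpa using hget
        obtain ⟨rfl, rfl⟩ := List.cons.inj hct
        simp [pvUpd, hAc, hval, pvAgg, List.map_append, List.sum_append, List.foldl_append]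
        omega
    · intro _
      rw [pvStepB, PySem.Dict.getD_insert_self]
      simp
  · refine ⟨?_, ?_, ?_⟩
    · simp [pvStepA, pvStepB, PySem.Dict.contains_insert, hc]
    · intro h tl hget
      rw [pvStepB, PySem.Dict.getD_insert_of_ne dB _ _ hk] at hget
      rw [pvStepA, PySem.Dict.getD_insert_of_ne dA _ _ hk]
      exact hv h tl hget
    · intro hcB
      rw [pvStepB, PySem.Dict.getD_insert_of_ne dB _ _ hk]
      rw [pvStepB, PySem.Dict.contains_insert] at hcB
      apply hne
      rcases (by simpa using hcB : k = pvTid e ∨ dB.contains k = true) with h1 | h1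
      · exact absurd h1 hk
      · exact h1

theorem pvRel_foldl (l : List (List (String × Int))) (dA : PySem.Dict Int (Int × Int × Int))
    (dB : PySem.Dict Int (List (List (String × Int)))) (hr : pvRel dA dB) :
    pvRel (l.foldl pvStepA dA) (l.foldl pvStepB dB) := by
  induction l generalizing dA dB with
  | nil => exact hr
  | cons e rest ih => exact ih _ _ (pvRel_step dA dB e hr)

theorem pvRel_empty : pvRel PySem.Dict.empty PySem.Dict.empty := by
  intro k
  refine ⟨by simp [PySem.Dict.contains_empty], ?_, ?_⟩
  · intro h tl hget; simp [PySem.Dict.getD_empty] at hget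
  · intro hx; simp [PySem.Dict.contains_empty] at hx

-- ===== VERDICT (by name: the statement is the Claim_ definition above) =====

theorem generate_effect_map_spec : Claim_equal_generate_effect_map := by
  intro effects _hdom hpre
  unfold Spec_generate_effect_map
  by_cases hnil : effects = []
  · simp [generate_effect_map, generate_effect_map_alt, hnil]
  · have hA := pvLoopA_eq effects PySem.Dict.empty hpre
    have hB := pvLoopB_eq effects PySem.Dict.empty hpre
    simp only [generate_effect_map, generate_effect_map_alt, hnil, hA, hB]
    set dA := effects.foldl pvStepA PySem.Dict.empty with hdA
    set dB := effects.foldl pvStepB PySem.Dict.empty with hdB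
    have hrel : pvRel dA dB := pvRel_foldl effects _ _ pvRel_empty
    have hndA : dA.keys.Nodup := by
      rw [hdA, show pvStepA = (fun g e => g.insert (pvTid e) (pvUpd g e)) from rfl]
      exact PySem.Dict.nodup_keys_foldl_insert_key effects pvTid _ _ (by simp [PySem.Dict.keys_empty])
    have hndB : dB.keys.Nodup := by
      rw [hdB, show pvStepB = (fun g e => g.insert (pvTid e) (g.getD (pvTid e) [] ++ [e])) from rfl]
      exact PySem.Dict.nodup_keys_foldl_insert_key effects pvTid _ _ (by simp [PySem.Dict.keys_empty])
    have hkeys : dA.keys = dB.keys := by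
      rw [hdA, hdB, show pvStepA = (fun g e => g.insert (pvTid e) (pvUpd g e)) from rfl,
        show pvStepB = (fun g e => g.insert (pvTid e) (g.getD (pvTid e) [] ++ [e])) from rfl,
        PySem.Dict.keys_foldl_insert_key, PySem.Dict.keys_foldl_insert_key] ; rfl
    rw [PySem.Dict.items_eq_map_keys dA hndA (0, 0, 0),
        PySem.Dict.items_eq_map_keys dB hndB [], hkeys]
    simp only [List.map_map]
    have hmap : List.map ((fun p => pvFmt p.1 p.2.1 p.2.2.1 p.2.2.2) ∘ fun k => (k, dA.getD k (0, 0, 0))) dB.keys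
        = List.map ((fun p =>
              pvFmt p.1 (List.map pvVal1 p.2).sum (List.map pvVal2 p.2).sum
                ((PySem.List.max? (List.map pvTurns p.2) fun y => y).getD 0)) ∘
            fun k => (k, dB.getD k [])) dB.keys := by
      apply List.map_congr_left
      intro k hk
      have hcB : dB.contains k = true := (PySem.Dict.contains_iff_mem_keys dB k).mpr hk
      obtain ⟨hcAB, hv, hne⟩ := hrel k
      rcases hB0 : dB.getD k [] with _ | ⟨h0, tl0⟩
      · exact absurd hB0 (hne hcB)
      · have hval := hv h0 tl0 hB0
        simp only [Function.comp_apply, hB0, hval, List.map_cons, PySem.List.max?_id_cons,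
          Option.getD_some, List.sum_cons, pvAgg]
    rw [hmap]
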